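-- pv_equiv track=rewrite | github.com/RokKuzner/FriendFace | search.py | common_char_sequences
-- ===== SOURCE A (Python) =====
-- def find_closest_char(str:str, char:str, start_index:int):
--     closes_char = 0
--     pointer = start_index
--     found = False
--
--     while pointer < len(str):
--         if char == str[pointer]:
--             found = True
--             break
--         else:
--             closes_char += 1
--             pointer += 1
--
--     if found:
--         return closes_char
--     else:
--         return False
--
-- def common_char_sequences(str1:str, str2:str):
--     pointer_1 = 0
--     pointer_2 = 0
--
--     common_char_sequences = 0
--
--     while pointer_1 < len(str1) and pointer_2 < len(str2):
--         if str1[pointer_1] == str2[pointer_2]: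
--             pointer_1 += 1
--             pointer_2 += 1
--
--             common_char_sequences += 1
--         else:
--             closest_to_next_same_char_in_str2 = find_closest_char(str2, str1[pointer_1], pointer_2)
--             closest_to_next_same_char_in_str1 = find_closest_char(str1, str2[pointer_2], pointer_1)
--
--             if closest_to_next_same_char_in_str2 and closest_to_next_same_char_in_str1:
--                 if closest_to_next_same_char_in_str2 < closest_to_next_same_char_in_str1:
--                     pointer_2 += closest_to_next_same_char_in_str2
--                 else:
--                     pointer_1 += closest_to_next_same_char_in_str1
--             elif closest_to_next_same_char_in_str2:
--                 pointer_2 += closest_to_next_same_char_in_str2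
--             elif closest_to_next_same_char_in_str1:
--                 pointer_1 += closest_to_next_same_char_in_str1
--             elif len(str1) > len(str2):
--                 pointer_1 += 1
--             else:
--                 pointer_2 += 1
--
--
--     return common_char_sequences
-- ===== SOURCE B (Python) =====
-- def _next_tables(s):
--     """nxt[i] maps each character to its smallest occurrence index >= i in s."""
--     n = len(s)
--     nxt = [None] * (n + 1)
--     cur = {}
--     nxt[n] = cur
--     for i in range(n - 1, -1, -1):
--         cur = dict(cur)
--         cur[s[i]] = i
--         nxt[i] = cur
--     return nxt
--
-- def common_char_sequences(str1: str, str2: str):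
--     nxt1 = _next_tables(str1)
--     nxt2 = _next_tables(str2)
--     n1, n2 = len(str1), len(str2)
--     p1 = p2 = count = 0
--     while p1 < n1 and p2 < n2:
--         if str1[p1] == str2[p2]:
--             p1 += 1
--             p2 += 1
--             count += 1
--         else:
--             j2 = nxt2[p2].get(str1[p1])
--             j1 = nxt1[p1].get(str2[p2])
--             if j2 is not None and j1 is not None:
--                 if j2 - p2 < j1 - p1:
--                     p2 = j2
--                 else:
--                     p1 = j1
--             elif j2 is not None:
--                 p2 = j2
--             elif j1 is not None:
--                 p1 = j1
--             elif n1 > n2: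
--                 p1 += 1
--             else:
--                 p2 += 1
--     return count
-- ===== Notes on version B (the rewrite author's own statement) =====
-- stated objective: alternative
-- what changed: B precomputes per-position next-occurrence dictionaries for each string once, so the mismatch step looks the next matching index up in O(1) instead of rescanning the string with find_closest_char; A's truthiness-based found/not-found encoding is replaced by None checks on the table lookup.
import Mathlib
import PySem

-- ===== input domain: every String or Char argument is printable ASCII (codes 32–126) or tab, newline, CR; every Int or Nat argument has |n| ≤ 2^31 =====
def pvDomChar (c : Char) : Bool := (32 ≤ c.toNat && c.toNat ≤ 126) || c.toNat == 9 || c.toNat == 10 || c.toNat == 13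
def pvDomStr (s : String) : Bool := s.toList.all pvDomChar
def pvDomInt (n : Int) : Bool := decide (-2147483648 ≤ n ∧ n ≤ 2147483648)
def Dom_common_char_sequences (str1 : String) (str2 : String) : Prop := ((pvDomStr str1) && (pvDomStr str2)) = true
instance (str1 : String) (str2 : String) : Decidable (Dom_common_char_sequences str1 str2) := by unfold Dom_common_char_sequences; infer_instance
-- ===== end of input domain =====

-- B replaces A's repeated linear find_closest_char scans by next-occurrence tables
-- precomputed once per string (objective: alternative algorithm; same return value).

-- ===== PORT A =====

-- Python truthiness of find_closest_char's result (an int distance, or False = none);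
-- 0 is falsy in Python, hence the `d != 0` test.
def pvTruthy (o : Option Int) : Bool :=
  match o with
  | none => false
  | some d => d != 0

-- while pointer < len(str): … ; returns some closes_char if found, none (= False) otherwise
def findClosestAux (s : List Char) (c : Char) (closes : Int) (pointer : Nat) : Option Int :=
  if _h : pointer < s.length then
    if c == s.getD pointer ' ' then some closes
    else findClosestAux s c (closes + 1) (pointer + 1)
  else none
termination_by s.length - pointer
decreasing_by omega

def find_closest_char (s : List Char) (c : Char) (start : Nat) : Option Int :=
  findClosestAux s c 0 start

-- the while loop of A; fuel only makes the recursion structural (each Python iteration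
-- advances a pointer, so len1+len2+1 fuel is never exhausted)
def loopA (s1 s2 : List Char) (fuel : Nat) (p1 p2 : Nat) (count : Int) : Int :=
  match fuel with
  | 0 => count
  | fuel + 1 =>
    if p1 < s1.length && p2 < s2.length then
      if s1.getD p1 ' ' == s2.getD p2 ' ' then
        loopA s1 s2 fuel (p1 + 1) (p2 + 1) (count + 1)
      else
        let c2 := find_closest_char s2 (s1.getD p1 ' ') p2
        let c1 := find_closest_char s1 (s2.getD p2 ' ') p1
        if pvTruthy c2 && pvTruthy c1 then
          if c2.getD 0 < c1.getD 0 then loopA s1 s2 fuel p1 (p2 + (c2.getD 0).toNat) count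
          else loopA s1 s2 fuel (p1 + (c1.getD 0).toNat) p2 count
        else if pvTruthy c2 then loopA s1 s2 fuel p1 (p2 + (c2.getD 0).toNat) count
        else if pvTruthy c1 then loopA s1 s2 fuel (p1 + (c1.getD 0).toNat) p2 count
        else if s1.length > s2.length then loopA s1 s2 fuel (p1 + 1) p2 count
        else loopA s1 s2 fuel p1 (p2 + 1) count
    else count

def common_char_sequences (str1 : String) (str2 : String) : Int :=
  let s1 := str1.toList
  let s2 := str2.toList
  loopA s1 s2 (s1.length + s2.length + 1) 0 0 0

-- ===== PORT B =====

-- _next_tables: nxt[i] maps each char to its smallest occurrence index ≥ i (built right to left)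
def buildNxt : List Char → Int → List (PySem.Dict Char Int)
  | [], _ => [PySem.Dict.empty]
  | c :: rest, i =>
    let tail := buildNxt rest (i + 1)
    (tail.headD PySem.Dict.empty).insert c i :: tail

-- the while loop of B: distances come from the tables, no inner scan
def loopB (s1 s2 : List Char) (nxt1 nxt2 : List (PySem.Dict Char Int))
    (fuel : Nat) (p1 p2 : Nat) (count : Int) : Int :=
  match fuel with
  | 0 => count
  | fuel + 1 =>
    if p1 < s1.length && p2 < s2.length then
      if s1.getD p1 ' ' == s2.getD p2 ' ' then
        loopB s1 s2 nxt1 nxt2 fuel (p1 + 1) (p2 + 1) (count + 1)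
      else
        let j2 := (nxt2.getD p2 PySem.Dict.empty).get? (s1.getD p1 ' ')
        let j1 := (nxt1.getD p1 PySem.Dict.empty).get? (s2.getD p2 ' ')
        match j2, j1 with
        | some a2, some a1 =>
          if a2 - (p2 : Int) < a1 - (p1 : Int) then loopB s1 s2 nxt1 nxt2 fuel p1 a2.toNat count
          else loopB s1 s2 nxt1 nxt2 fuel a1.toNat p2 count
        | some a2, none => loopB s1 s2 nxt1 nxt2 fuel p1 a2.toNat count
        | none, some a1 => loopB s1 s2 nxt1 nxt2 fuel a1.toNat p2 count
        | none, none =>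
          if s1.length > s2.length then loopB s1 s2 nxt1 nxt2 fuel (p1 + 1) p2 count
          else loopB s1 s2 nxt1 nxt2 fuel p1 (p2 + 1) count
    else count

def common_char_sequences_alt (str1 : String) (str2 : String) : Int :=
  let s1 := str1.toList
  let s2 := str2.toList
  let nxt1 := buildNxt s1 0
  let nxt2 := buildNxt s2 0
  loopB s1 s2 nxt1 nxt2 (s1.length + s2.length + 1) 0 0 0

-- ===== PRECONDITION & SPEC =====
def Spec_common_char_sequences (str1 : String) (str2 : String) (out : Int) : Prop := out = common_char_sequences_alt str1 str2
instance (str1 : String) (str2 : String) (out : Int) : Decidable (Spec_common_char_sequences str1 str2 out) := by unfold Spec_common_char_sequences; infer_instance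

-- ===== CLAIM (what is proved, stated in full; the proofs are below) =====
def Claim_equal_common_char_sequences : Prop := ∀ (str1 : String) (str2 : String), Dom_common_char_sequences str1 str2 → Spec_common_char_sequences str1 str2 (common_char_sequences str1 str2)

-- ===== LEMMAS AND PROOFS =====

-- offset (in the suffix s.drop p) of the first occurrence of c, the value both
-- A's scan and B's table lookup compute
def nextIdxL : List Char → Char → Option Nat
  | [], _ => none
  | x :: rest, c => if x == c then some 0 else (nextIdxL rest c).map (· + 1)

lemma findClosestAux_eq (s : List Char) (c : Char) (closes : Int) (p : Nat) :
    findClosestAux s c closes p = (nextIdxL (s.drop p) c).map (fun j => closes + (j : Int)) := by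
  fun_induction findClosestAux s c closes p with
  | case1 closes p h hc =>
    rw [List.drop_eq_getElem_cons h]
    have hg := List.getD_eq_getElem s ' ' h
    rw [hg] at hc
    have : s[p] == c := by
      have := eq_of_beq hc; simp [this.symm]
    simp [nextIdxL, this]
  | case2 closes p h hc ih =>
    rw [List.drop_eq_getElem_cons h]
    have hg := List.getD_eq_getElem s ' ' h
    rw [hg] at hc
    have hne : (s[p] == c) = false := by
      simp only [beq_eq_false_iff_ne]
      exact fun e => hc (by simp [e])
    rw [ih]
    simp only [nextIdxL, hne, Bool.false_eq_true, if_false]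
    cases nextIdxL (List.drop (p+1) s) c <;> simp
    omega
  | case3 closes p h =>
    rw [List.drop_eq_nil_of_le (by omega)]
    simp [nextIdxL]

lemma headD_eq_getD_zero {α : Type} (l : List α) (d : α) : l.headD d = l.getD 0 d := by
  cases l <;> simp

lemma buildNxt_get (s : List Char) : ∀ (k : Int) (p : Nat) (c : Char), p ≤ s.length →
    ((buildNxt s k).getD p PySem.Dict.empty).get? c
      = (nextIdxL (s.drop p) c).map (fun j => k + ((p + j : Nat) : Int)) := by
  induction s with
  | nil =>
    intro k p c hp
    have h0 : p = 0 := by simpa using hp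
    subst h0
    simp [buildNxt, nextIdxL, PySem.Dict.get?_empty]
  | cons x rest ih =>
    intro k p c hp
    match p with
    | 0 =>
      simp only [buildNxt, List.getD_cons_zero, List.drop_zero]
      rw [headD_eq_getD_zero]
      by_cases hxc : c = x
      · subst hxc
        rw [PySem.Dict.get?_insert_self]
        simp [nextIdxL]
      · rw [PySem.Dict.get?_insert_of_ne _ _ hxc]
        rw [ih (k+1) 0 c (by omega)]
        have hbne : (x == c) = false := by simp [beq_eq_false_iff_ne]; exact fun e => hxc e.symm
        simp only [List.drop_zero, nextIdxL, hbne, Bool.false_eq_true, if_false]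
        cases nextIdxL rest c <;> simp
        omega
    | q + 1 =>
      simp only [buildNxt, List.getD_cons_succ, List.drop_succ_cons]
      rw [ih (k+1) q c (by simpa using hp)]
      cases nextIdxL (rest.drop q) c <;> simp
      omega

lemma nextIdxL_pos (x : Char) (l : List Char) (c : Char) (hx : (x == c) = false) (j : Nat)
    (h : nextIdxL (x :: l) c = some j) : 1 ≤ j := by
  simp only [nextIdxL, hx, Bool.false_eq_true, if_false] at h
  cases hl : nextIdxL l c <;> rw [hl] at h <;> simp at h
  omega

lemma loop_eq (s1 s2 : List Char) (fuel : Nat) : ∀ (p1 p2 : Nat) (count : Int),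
    loopA s1 s2 fuel p1 p2 count
      = loopB s1 s2 (buildNxt s1 0) (buildNxt s2 0) fuel p1 p2 count := by
  induction fuel with
  | zero => intro p1 p2 count; rfl
  | succ fuel ih =>
    intro p1 p2 count
    rw [loopA, loopB]
    by_cases hb : (p1 < s1.length && p2 < s2.length) = true
    · rw [if_pos hb, if_pos hb]
      obtain ⟨h1, h2⟩ : p1 < s1.length ∧ p2 < s2.length := by simpa using hb
      by_cases hm : (s1.getD p1 ' ' == s2.getD p2 ' ') = true
      · rw [if_pos hm, if_pos hm]; exact ih _ _ _
      · rw [if_neg hm, if_neg hm]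
        have e2 : find_closest_char s2 (s1.getD p1 ' ') p2
            = (nextIdxL (s2.drop p2) (s1.getD p1 ' ')).map (fun j : Nat => (j : Int)) := by
          rw [find_closest_char, findClosestAux_eq]
          cases nextIdxL (s2.drop p2) (s1.getD p1 ' ') <;> simp
        have e1 : find_closest_char s1 (s2.getD p2 ' ') p1
            = (nextIdxL (s1.drop p1) (s2.getD p2 ' ')).map (fun j : Nat => (j : Int)) := by
          rw [find_closest_char, findClosestAux_eq]
          cases nextIdxL (s1.drop p1) (s2.getD p2 ' ') <;> simp
        have g2 : ((buildNxt s2 0).getD p2 PySem.Dict.empty).get? (s1.getD p1 ' ')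
            = (nextIdxL (s2.drop p2) (s1.getD p1 ' ')).map (fun j => ((p2 + j : Nat) : Int)) := by
          rw [buildNxt_get s2 0 p2 _ (le_of_lt h2)]; simp
        have g1 : ((buildNxt s1 0).getD p1 PySem.Dict.empty).get? (s2.getD p2 ' ')
            = (nextIdxL (s1.drop p1) (s2.getD p2 ' ')).map (fun j => ((p1 + j : Nat) : Int)) := by
          rw [buildNxt_get s1 0 p1 _ (le_of_lt h1)]; simp
        have hd2 : s2.drop p2 = s2[p2] :: s2.drop (p2 + 1) := List.drop_eq_getElem_cons h2
        have hd1 : s1.drop p1 = s1[p1] :: s1.drop (p1 + 1) := List.drop_eq_getElem_cons h1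
        have hne : s1.getD p1 ' ' ≠ s2.getD p2 ' ' := by simpa using hm
        have hx2 : (s2[p2] == s1.getD p1 ' ') = false := by
          rw [← List.getD_eq_getElem s2 ' ' h2]
          simp only [beq_eq_false_iff_ne]
          exact fun e => hne e.symm
        have hx1 : (s1[p1] == s2.getD p2 ' ') = false := by
          rw [← List.getD_eq_getElem s1 ' ' h1]
          simp only [beq_eq_false_iff_ne]
          exact hne
        simp only [e2, e1, g2, g1]
        cases o2 : nextIdxL (s2.drop p2) (s1.getD p1 ' ') with
        | some j2 =>
          have hj2 : 1 ≤ j2 := nextIdxL_pos _ _ _ hx2 _ (hd2 ▸ o2)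
          cases o1 : nextIdxL (s1.drop p1) (s2.getD p2 ' ') with
          | some j1 =>
            have hj1 : 1 ≤ j1 := nextIdxL_pos _ _ _ hx1 _ (hd1 ▸ o1)
            have ht2 : pvTruthy (some (j2 : Int)) = true := by simp [pvTruthy]; omega
            have ht1 : pvTruthy (some (j1 : Int)) = true := by simp [pvTruthy]; omega
            simp only [Option.map_some, ht2, ht1, Bool.and_self, if_true, Option.getD_some]
            have hcond : ((j2 : Int) < (j1 : Int)) ↔
                (((p2 + j2 : Nat) : Int) - (p2 : Int) < ((p1 + j1 : Nat) : Int) - (p1 : Int)) := by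
              push_cast; omega
            by_cases hlt : (j2 : Int) < (j1 : Int)
            · rw [if_pos hlt, if_pos (hcond.mp hlt)]
              have : ((p2 + j2 : Nat) : Int).toNat = p2 + (j2 : Int).toNat := by push_cast; omega
              rw [this]; exact ih _ _ _
            · rw [if_neg hlt, if_neg (fun hc => hlt (hcond.mpr hc))]
              have : ((p1 + j1 : Nat) : Int).toNat = p1 + (j1 : Int).toNat := by push_cast; omega
              rw [this]; exact ih _ _ _
          | none =>
            have ht2 : pvTruthy (some (j2 : Int)) = true := by simp [pvTruthy]; omega
            simp only [Option.map_some, Option.map_none, pvTruthy, Option.getD_some, Bool.and_false,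
              Bool.false_eq_true, if_false]
            rw [if_pos (show ((j2 : Int) != 0) = true by simp; omega)]
            have : ((p2 + j2 : Nat) : Int).toNat = p2 + (j2 : Int).toNat := by push_cast; omega
            rw [this]; exact ih _ _ _
        | none =>
          cases o1 : nextIdxL (s1.drop p1) (s2.getD p2 ' ') with
          | some j1 =>
            have hj1 : 1 ≤ j1 := nextIdxL_pos _ _ _ hx1 _ (hd1 ▸ o1)
            have ht1 : pvTruthy (some (j1 : Int)) = true := by simp [pvTruthy]; omega
            simp only [Option.map_some, Option.map_none, pvTruthy, Option.getD_some, Bool.false_and,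
              Bool.false_eq_true, if_false]
            rw [if_pos (show ((j1 : Int) != 0) = true by simp; omega)]
            have : ((p1 + j1 : Nat) : Int).toNat = p1 + (j1 : Int).toNat := by push_cast; omega
            rw [this]; exact ih _ _ _
          | none =>
            simp only [Option.map_none, pvTruthy, Bool.and_self, Bool.false_eq_true, if_false]
            by_cases hg : s1.length > s2.length
            · rw [if_pos hg, if_pos hg]; exact ih _ _ _
            · rw [if_neg hg, if_neg hg]; exact ih _ _ _
    · rw [if_neg hb, if_neg hb]

-- ===== VERDICT (by name: the statement is the Claim_ definition above) =====
theorem common_char_sequences_spec : Claim_equal_common_char_sequences := by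
  intro str1 str2 _
  unfold Spec_common_char_sequences common_char_sequences common_char_sequences_alt
  exact loop_eq _ _ _ 0 0 0
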